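-- pv_equiv track=rewrite | github.com/greivinlopez/coding-solutions | python/leetcode/problems_0400_0499/491_non_decreasing_subsequences.py | find_subsequences_alt
-- ===== SOURCE A (Python) =====
-- def find_subsequences_alt(nums):
--     def backtrack(curr, nums):
--         if( len(curr) >= 2 and curr[-1] < curr[-2] ): return
--         if( len(curr) >= 2 and curr[:] not in result):
--             result.add(curr[:])
--         for i in range(len(nums)):
--             backtrack( curr + (nums[i],), nums[i+1:] )  # using tuples for curr instead of list
--     result = set()
--     backtrack( (), nums)
--     return result
-- ===== SOURCE B (Python) =====
-- def find_subsequences_alt(nums):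
--     n = len(nums)
--     result = set()
--     stack = [((), 0)]
--     while stack:
--         curr, start = stack.pop()
--         if len(curr) >= 2:
--             result.add(curr)
--         for i in reversed(range(start, n)):
--             if not curr or curr[-1] <= nums[i]:
--                 stack.append((curr + (nums[i],), i + 1))
--     return result
-- ===== Notes on version B (the rewrite author's own statement) =====
-- stated objective: alternative
-- what changed: A's recursive backtracking closure that re-slices nums (nums[i+1:]) and re-checks validity at entry is replaced by an iterative while-loop over an explicit stack of (subsequence, start-index) frames on the fixed list, which prunes invalid extensions before pushing them and never copies slices.
import Mathlib
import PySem

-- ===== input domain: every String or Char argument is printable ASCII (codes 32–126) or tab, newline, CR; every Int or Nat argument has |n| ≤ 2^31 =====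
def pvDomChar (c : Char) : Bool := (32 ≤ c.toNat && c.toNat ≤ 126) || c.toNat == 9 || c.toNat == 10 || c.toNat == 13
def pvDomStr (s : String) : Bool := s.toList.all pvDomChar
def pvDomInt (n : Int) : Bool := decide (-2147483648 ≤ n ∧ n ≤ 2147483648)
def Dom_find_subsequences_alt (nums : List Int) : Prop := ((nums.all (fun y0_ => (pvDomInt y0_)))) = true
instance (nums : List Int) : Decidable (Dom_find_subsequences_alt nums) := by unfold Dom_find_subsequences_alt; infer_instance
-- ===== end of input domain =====

-- B replaces A's recursive backtracking over list slices by an iterative explicit-stack search over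
-- start indices that prunes extensions before pushing them (objective: alternative).

-- ===== PORT A =====
-- The nonlocal set `result` is threaded as an accumulator; `curr[-1]`/`curr[-2]` are
-- PySem.List.pyGetD (exact under the `len(curr) >= 2` conjunct guarding them); for
-- i ∈ range(len(nums)), `nums[i]` is `nums.getD i 0` and the slice `nums[i+1:]` is
-- `nums.drop (i+1)` (exact: i is a nonnegative in-range index).
def find_subsequences_alt_backtrack (curr : List Int) (nums : List Int)
    (result : List (List Int)) : List (List Int) :=
  if 2 ≤ curr.length ∧ PySem.List.pyGetD curr (-1) 0 < PySem.List.pyGetD curr (-2) 0 then result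
  else
    let result1 :=
      if 2 ≤ curr.length ∧ PySem.Set.contains result curr = false then
        PySem.Set.add result curr
      else result
    (List.range nums.length).attach.foldl
      (fun r i =>
        find_subsequences_alt_backtrack (curr ++ [nums.getD i.1 0]) (nums.drop (i.1 + 1)) r)
      result1
termination_by nums.length
decreasing_by
  have h := i.2
  simp only [List.mem_range] at h
  simp only [List.length_drop]
  omega

def find_subsequences_alt (nums : List Int) : List (List Int) :=
  find_subsequences_alt_backtrack [] nums PySem.Set.empty

-- ===== PORT B =====
-- Tiny Nat-subtraction facts for the termination argument (hand-proved: they sit inside the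
-- port's well-founded recursion, where generated arithmetic proof terms must stay small).
theorem pvSubOne (n s : Nat) (h : s ≤ n) : n + 1 - s = (n + 1 - (s + 1)) + 1 := by
  rw [Nat.succ_sub_succ]; exact Nat.succ_sub h

theorem pvSubShift (n s k : Nat) : n + 1 - (s + 1) - k = n + 1 - s - (k + 1) := by
  rw [Nat.succ_sub_succ, Nat.sub_sub, Nat.sub_sub]
  rw [show s + (k + 1) = (s + k) + 1 from rfl, Nat.succ_sub_succ]

theorem pvSubGap (n s : Nat) (h : s ≤ n) : n + 1 - s - (n - s) = 1 := by
  rw [Nat.sub_sub, Nat.add_sub_cancel' h, Nat.succ_sub (Nat.le_refl n), Nat.sub_self]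

theorem pvAddSubLe (n s : Nat) (h : s ≤ n) : s + (n - s) ≤ n + 1 := by
  rw [Nat.add_sub_cancel' h]; exact Nat.le_succ n

theorem pvStepLe (s k n : Nat) (hsk : s + (k + 1) ≤ n + 1) : s + 1 + k ≤ n + 1 := by
  rw [Nat.add_right_comm]; exact hsk

theorem pvLeOfStep (s k n : Nat) (hsk : s + (k + 1) ≤ n + 1) : s ≤ n :=
  Nat.le_of_succ_le_succ
    (Nat.le_trans (Nat.add_le_add_left (Nat.succ_le_succ (Nat.zero_le k)) s) hsk)

-- Termination helper for the while-loop: the sum of 2^(n - start) over the stack decreases.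
theorem pvPushSumBound (nums curr : List Int) :
    ∀ (k s : Nat) (rest : List (List Int × Nat)), s + k ≤ nums.length + 1 →
      (((List.range' s k).foldr
            (fun i st =>
              if curr = [] ∨ PySem.List.pyGetD curr (-1) 0 ≤ nums.getD i 0 then
                (curr ++ [nums.getD i 0], i + 1) :: st
              else st) rest).map (fun p => 2 ^ (nums.length + 1 - p.2))).sum +
          2 ^ (nums.length + 1 - s - k) ≤
        2 ^ (nums.length + 1 - s) + (rest.map (fun p => 2 ^ (nums.length + 1 - p.2))).sum := by
  intro k
  induction k with
  | zero =>
      intro s rest _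
      simp only [List.range'_zero, List.foldr_nil, Nat.sub_zero]
      exact Nat.le_of_eq (Nat.add_comm _ _)
  | succ k ih =>
      intro s rest hsk
      rw [List.range'_succ, List.foldr_cons]
      have hX := ih (s + 1) rest (pvStepLe s k nums.length hsk)
      have e1 : (2 : Nat) ^ (nums.length + 1 - s) =
          2 ^ (nums.length + 1 - (s + 1)) + 2 ^ (nums.length + 1 - (s + 1)) := by
        rw [pvSubOne nums.length s (pvLeOfStep s k nums.length hsk), pow_succ, Nat.mul_two]
      have e2 : (2 : Nat) ^ (nums.length + 1 - (s + 1) - k) =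
          2 ^ (nums.length + 1 - s - (k + 1)) := by
        rw [pvSubShift nums.length s k]
      by_cases hc : curr = [] ∨ PySem.List.pyGetD curr (-1) 0 ≤ nums.getD s 0
      · rw [if_pos hc]
        simp only [List.map_cons, List.sum_cons]
        calc 2 ^ (nums.length + 1 - (s + 1)) +
              ((List.map (fun p => 2 ^ (nums.length + 1 - p.2))
                ((List.range' (s + 1) k).foldr
                  (fun i st =>
                    if curr = [] ∨ PySem.List.pyGetD curr (-1) 0 ≤ nums.getD i 0 then
                      (curr ++ [nums.getD i 0], i + 1) :: st
                    else st) rest)).sum) + 2 ^ (nums.length + 1 - s - (k + 1))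
            = 2 ^ (nums.length + 1 - (s + 1)) +
              ((List.map (fun p => 2 ^ (nums.length + 1 - p.2))
                ((List.range' (s + 1) k).foldr
                  (fun i st =>
                    if curr = [] ∨ PySem.List.pyGetD curr (-1) 0 ≤ nums.getD i 0 then
                      (curr ++ [nums.getD i 0], i + 1) :: st
                    else st) rest)).sum + 2 ^ (nums.length + 1 - (s + 1) - k)) := by
              rw [← e2, Nat.add_assoc]
          _ ≤ 2 ^ (nums.length + 1 - (s + 1)) +
              (2 ^ (nums.length + 1 - (s + 1)) +
                (rest.map (fun p => 2 ^ (nums.length + 1 - p.2))).sum) :=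
              Nat.add_le_add_left hX _
          _ = (2 ^ (nums.length + 1 - (s + 1)) + 2 ^ (nums.length + 1 - (s + 1))) +
              (rest.map (fun p => 2 ^ (nums.length + 1 - p.2))).sum := (Nat.add_assoc _ _ _).symm
          _ = 2 ^ (nums.length + 1 - s) +
              (rest.map (fun p => 2 ^ (nums.length + 1 - p.2))).sum := by rw [← e1]
      · rw [if_neg hc]
        calc ((List.map (fun p => 2 ^ (nums.length + 1 - p.2))
                ((List.range' (s + 1) k).foldr
                  (fun i st =>
                    if curr = [] ∨ PySem.List.pyGetD curr (-1) 0 ≤ nums.getD i 0 then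
                      (curr ++ [nums.getD i 0], i + 1) :: st
                    else st) rest)).sum) + 2 ^ (nums.length + 1 - s - (k + 1))
            = ((List.map (fun p => 2 ^ (nums.length + 1 - p.2))
                ((List.range' (s + 1) k).foldr
                  (fun i st =>
                    if curr = [] ∨ PySem.List.pyGetD curr (-1) 0 ≤ nums.getD i 0 then
                      (curr ++ [nums.getD i 0], i + 1) :: st
                    else st) rest)).sum) + 2 ^ (nums.length + 1 - (s + 1) - k) := by rw [← e2]
          _ ≤ 2 ^ (nums.length + 1 - (s + 1)) +
              (rest.map (fun p => 2 ^ (nums.length + 1 - p.2))).sum := hX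
          _ ≤ (2 ^ (nums.length + 1 - (s + 1)) + 2 ^ (nums.length + 1 - (s + 1))) +
              (rest.map (fun p => 2 ^ (nums.length + 1 - p.2))).sum :=
              Nat.add_le_add_right (Nat.le_add_left _ _) _
          _ = 2 ^ (nums.length + 1 - s) +
              (rest.map (fun p => 2 ^ (nums.length + 1 - p.2))).sum := by rw [← e1]

-- The Python list `stack` is ported with the Lean list's HEAD as the Python list's END:
-- `stack.pop()` is a head match, `stack.append(x)` is `x :: st`; `reversed(range(start, n))`
-- is `(List.range' start (n - start)).reverse` (range(start, n) of natural numbers);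
-- `curr[-1]` is PySem.List.pyGetD, guarded by `not curr`; `nums[i]` is `nums.getD i 0` (in range).
def find_subsequences_alt_alt_loop (nums : List Int) (stack : List (List Int × Nat))
    (result : List (List Int)) : List (List Int) :=
  match stack with
  | [] => result
  | (curr, start) :: rest =>
      let result1 := if 2 ≤ curr.length then PySem.Set.add result curr else result
      let stack1 :=
        ((List.range' start (nums.length - start)).reverse).foldl
          (fun st i =>
            if curr = [] ∨ PySem.List.pyGetD curr (-1) 0 ≤ nums.getD i 0 then
              (curr ++ [nums.getD i 0], i + 1) :: st
            else st)
          rest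
      find_subsequences_alt_alt_loop nums stack1 result1
termination_by (stack.map (fun p => 2 ^ (nums.length + 1 - p.2))).sum
decreasing_by
  simp only [List.map_cons, List.sum_cons]
  rw [List.foldl_reverse]
  simp only [dite_eq_ite]
  rcases Nat.lt_or_ge nums.length start with hs | hs
  · have he : nums.length - start = 0 := Nat.sub_eq_zero_of_le (Nat.le_of_lt hs)
    rw [he]
    simp only [List.range'_zero, List.foldr_nil]
    exact Nat.lt_add_of_pos_left (Nat.two_pow_pos _)
  · have hb := pvPushSumBound nums curr (nums.length - start) start rest
      (pvAddSubLe nums.length start hs)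
    rw [pvSubGap nums.length start hs, pow_one] at hb
    exact Nat.lt_of_lt_of_le (Nat.lt_add_of_pos_right (by decide)) hb

def find_subsequences_alt_alt (nums : List Int) : List (List Int) :=
  find_subsequences_alt_alt_loop nums [([], 0)] PySem.Set.empty

-- ===== PRECONDITION & SPEC =====
def Spec_find_subsequences_alt (nums : List Int) (out : List (List Int)) : Prop := out = find_subsequences_alt_alt nums
instance (nums : List Int) (out : List (List Int)) : Decidable (Spec_find_subsequences_alt nums out) := by unfold Spec_find_subsequences_alt; infer_instance

-- ===== CLAIM (what is proved, stated in full; the proofs are below) =====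
def Claim_equal_find_subsequences_alt : Prop := ∀ (nums : List Int), Dom_find_subsequences_alt nums → Spec_find_subsequences_alt nums (find_subsequences_alt nums)

-- ===== LEMMAS AND PROOFS =====

-- Instantiation wrapper for List.foldl_attach (explicit f, so `exact` can unify).
theorem pvFoldAtt {a b : Type} (f : b → a → b) (l : List a) (init : b) :
    l.attach.foldl (fun acc i => f acc i.1) init = l.foldl f init := List.foldl_attach

-- The common shape both ports reduce to: visit (curr, s), adding curr if long enough and then
-- visiting every valid extension (curr ++ [nums[i]], i + 1), i ∈ [s, n), left to right.
def pvVisit (nums : List Int) (curr : List Int) (s : Nat) (result : List (List Int)) :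
    List (List Int) :=
  (List.range' s (nums.length - s)).attach.foldl
    (fun r i =>
      if curr = [] ∨ PySem.List.pyGetD curr (-1) 0 ≤ nums.getD i.1 0 then
        pvVisit nums (curr ++ [nums.getD i.1 0]) (i.1 + 1) r
      else r)
    (if 2 ≤ curr.length then PySem.Set.add result curr else result)
termination_by nums.length - s
decreasing_by
  have h := i.2
  rw [List.mem_range'_1] at h
  omega

theorem pvVisit_eq (nums curr : List Int) (s : Nat) (r : List (List Int)) :
    pvVisit nums curr s r =
      (List.range' s (nums.length - s)).foldl
        (fun r i =>
          if curr = [] ∨ PySem.List.pyGetD curr (-1) 0 ≤ nums.getD i 0 then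
            pvVisit nums (curr ++ [nums.getD i 0]) (i + 1) r
          else r)
        (if 2 ≤ curr.length then PySem.Set.add r curr else r) := by
  rw [pvVisit]
  exact pvFoldAtt
    (fun r i =>
      if curr = [] ∨ PySem.List.pyGetD curr (-1) 0 ≤ nums.getD i 0 then
        pvVisit nums (curr ++ [nums.getD i 0]) (i + 1) r
      else r) _ _

theorem pvA_unfold (curr nums : List Int) (r : List (List Int))
    (h : ¬(2 ≤ curr.length ∧ PySem.List.pyGetD curr (-1) 0 < PySem.List.pyGetD curr (-2) 0)) :
    find_subsequences_alt_backtrack curr nums r =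
      (List.range nums.length).foldl
        (fun r i => find_subsequences_alt_backtrack (curr ++ [nums.getD i 0]) (nums.drop (i + 1)) r)
        (if 2 ≤ curr.length ∧ PySem.Set.contains r curr = false then PySem.Set.add r curr
         else r) := by
  rw [find_subsequences_alt_backtrack, if_neg h]
  exact pvFoldAtt
    (fun r i => find_subsequences_alt_backtrack (curr ++ [nums.getD i 0]) (nums.drop (i + 1)) r)
    _ _

theorem pvGetD_neg_two (c : List Int) (x : Int) (d : Int) (h : c ≠ []) :
    PySem.List.pyGetD (c ++ [x]) (-2) d = PySem.List.pyGetD c (-1) d := by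
  have hl : 0 < c.length := List.length_pos_iff.mpr h
  rw [PySem.List.pyGetD_neg_ofNat (c ++ [x]) 2 d (by omega) (by simp; omega)]
  rw [PySem.List.pyGetD_neg_one c d h]
  have hlt : (c ++ [x]).length - 2 < c.length := by simp; omega
  rw [List.getLast_eq_getElem, List.getElem_append_left hlt]
  congr 1
  simp

-- A's entry check kills exactly the extensions B never pushes.
theorem pvA_dead (curr rest : List Int) (x : Int) (r : List (List Int)) (h : curr ≠ [])
    (hlt : x < PySem.List.pyGetD curr (-1) 0) :
    find_subsequences_alt_backtrack (curr ++ [x]) rest r = r := by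
  rw [find_subsequences_alt_backtrack, if_pos]
  have hl : 0 < curr.length := List.length_pos_iff.mpr h
  refine ⟨by simp; omega, ?_⟩
  rw [PySem.List.pyGetD_neg_one_append_singleton, pvGetD_neg_two curr x 0 h]
  exact hlt

-- A's "add if not already in the set" is Set.add.
theorem pvAdd_eq (curr : List Int) (r : List (List Int)) :
    (if 2 ≤ curr.length ∧ PySem.Set.contains r curr = false then PySem.Set.add r curr else r) =
      (if 2 ≤ curr.length then PySem.Set.add r curr else r) := by
  by_cases h2 : 2 ≤ curr.length
  · by_cases hc : PySem.Set.contains r curr = false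
    · rw [if_pos ⟨h2, hc⟩, if_pos h2]
    · rw [if_neg (by tauto), if_pos h2]
      have hm : curr ∈ r := by
        have ht : PySem.Set.contains r curr = true := by
          cases hb : PySem.Set.contains r curr
          · exact absurd hb hc
          · rfl
        simpa using ht
      rw [PySem.Set.add_of_mem hm]
  · rw [if_neg (by tauto), if_neg h2]

-- A on the suffix nums[s:] computes pvVisit at start index s, as long as the entry check is off.
theorem pvA_eq_visit (nums : List Int) :
    ∀ (k s : Nat) (curr : List Int) (r : List (List Int)), nums.length - s ≤ k →
      s ≤ nums.length →
      ¬(2 ≤ curr.length ∧ PySem.List.pyGetD curr (-1) 0 < PySem.List.pyGetD curr (-2) 0) →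
      find_subsequences_alt_backtrack curr (nums.drop s) r = pvVisit nums curr s r := by
  intro k
  induction k with
  | zero =>
      intro s curr r hk hs hchk
      have hse : s = nums.length := by omega
      subst hse
      rw [pvA_unfold _ _ _ hchk, pvVisit_eq]
      simp only [List.drop_length, List.length_nil, List.range_zero, List.foldl_nil,
        Nat.sub_self, List.range'_zero]
      exact pvAdd_eq curr r
  | succ k ih =>
      intro s curr r hk hs hchk
      rw [pvA_unfold _ _ _ hchk, pvVisit_eq, pvAdd_eq, List.length_drop,
        List.range'_eq_map_range, List.foldl_map]
      apply PySem.List.foldl_congr_mem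
      intro acc j hj
      rw [List.mem_range] at hj
      have hget : (nums.drop s).getD j 0 = nums.getD (s + j) 0 := by
        rw [List.getD_eq_getElem?_getD, List.getD_eq_getElem?_getD, List.getElem?_drop]
      have hdrop : (nums.drop s).drop (j + 1) = nums.drop (s + j + 1) := by
        have hsum : s + (j + 1) = s + j + 1 := by omega
        rw [List.drop_drop, hsum]
      rw [hget, hdrop]
      by_cases hc : curr = [] ∨ PySem.List.pyGetD curr (-1) 0 ≤ nums.getD (s + j) 0
      · rw [if_pos hc]
        apply ih (s + j + 1) _ acc (by omega) (by omega)
        rcases hc with rfl | hle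
        · intro ⟨h2, _⟩; simp at h2
        · intro ⟨h2, hlt⟩
          have hne : curr ≠ [] := by
            intro hnil; subst hnil; simp at h2
          rw [PySem.List.pyGetD_neg_one_append_singleton,
            pvGetD_neg_two curr _ 0 hne] at hlt
          omega
      · rw [if_neg hc]
        have hne : curr ≠ [] := fun h => hc (Or.inl h)
        have hlt : nums.getD (s + j) 0 < PySem.List.pyGetD curr (-1) 0 := by
          by_contra hle
          exact hc (Or.inr (by omega))
        exact pvA_dead curr _ _ acc hne hlt

-- Popping one frame from B's stack runs pvVisit on it before the rest of the stack.
theorem pvB_pop (nums : List Int) :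
    ∀ (k s : Nat) (curr : List Int) (stack : List (List Int × Nat)) (r : List (List Int)),
      nums.length - s ≤ k →
      find_subsequences_alt_alt_loop nums ((curr, s) :: stack) r =
        find_subsequences_alt_alt_loop nums stack (pvVisit nums curr s r) := by
  intro k
  induction k with
  | zero =>
      intro s curr stack r hk
      have hse : nums.length - s = 0 := by omega
      rw [find_subsequences_alt_alt_loop, pvVisit_eq, hse]
      simp
  | succ k ih =>
      intro s curr stack r hk
      rw [find_subsequences_alt_alt_loop, pvVisit_eq]
      simp only [List.foldl_reverse]
      have hchunk : ∀ (l : List Nat), (∀ i ∈ l, s ≤ i ∧ i < nums.length) →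
          ∀ (st : List (List Int × Nat)) (acc : List (List Int)),
            find_subsequences_alt_alt_loop nums
              (l.foldr (fun i st =>
                if curr = [] ∨ PySem.List.pyGetD curr (-1) 0 ≤ nums.getD i 0 then
                  (curr ++ [nums.getD i 0], i + 1) :: st
                else st) st) acc =
            find_subsequences_alt_alt_loop nums st
              (l.foldl (fun acc i =>
                if curr = [] ∨ PySem.List.pyGetD curr (-1) 0 ≤ nums.getD i 0 then
                  pvVisit nums (curr ++ [nums.getD i 0]) (i + 1) acc
                else acc) acc) := by
        intro l
        induction l with
        | nil => intro _ st acc; simp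
        | cons i t iht =>
            intro hmem st acc
            have hi := hmem i (by simp)
            simp only [List.foldr_cons, List.foldl_cons]
            by_cases hc : curr = [] ∨ PySem.List.pyGetD curr (-1) 0 ≤ nums.getD i 0
            · rw [if_pos hc, if_pos hc]
              rw [ih (i + 1) (curr ++ [nums.getD i 0]) _ acc (by omega)]
              exact iht (fun j hj => hmem j (by simp [hj])) st _
            · rw [if_neg hc, if_neg hc]
              exact iht (fun j hj => hmem j (by simp [hj])) st acc
      rw [hchunk (List.range' s (nums.length - s))
            (fun i hi => by rw [List.mem_range'_1] at hi; omega)]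

-- ===== VERDICT (by name: the statement is the Claim_ definition above) =====
theorem find_subsequences_alt_spec : Claim_equal_find_subsequences_alt := by
  intro nums _
  unfold Spec_find_subsequences_alt find_subsequences_alt find_subsequences_alt_alt
  rw [pvB_pop nums nums.length 0 [] [] PySem.Set.empty (by omega)]
  rw [find_subsequences_alt_alt_loop]
  have := pvA_eq_visit nums nums.length 0 [] PySem.Set.empty (by omega) (by omega) (by simp)
  simpa using this
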